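-- pv_equiv track=rewrite | github.com/angelotoledo-gif/python-learning | Week_2/Week2_Lab2.py | find_exclusive_students
-- ===== SOURCE A (Python) =====
-- def find_exclusive_students(course, enrollments):
--     """
--     Find students who ONLY take this one course.
--     Args:
--     course: Course code
--     enrollments: Dictionary of course enrollments
--     Returns:
--     Set of students taking only this course
--     """
--     # TODO: Implement this function
--     exclusive_students = set()
--     target_students = enrollments.get(course, set())
--     for student in target_students:
--         # Check if the student is enrolled in any other course
--         enrolled_courses = [c for c, students in enrollments.items() if student in students]
--         if len(enrolled_courses) == 1:
--             exclusive_students.add(student)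
--     return exclusive_students
-- ===== SOURCE B (Python) =====
-- def find_exclusive_students(course, enrollments):
--     # One counting pass: for each course, bump a per-student course counter once
--     # per course the student appears in; then keep target students with count 1.
--     counts = {}
--     for students in enrollments.values():
--         for s in set(students):
--             counts[s] = counts.get(s, 0) + 1
--     return {s for s in enrollments.get(course, set()) if counts.get(s, 0) == 1}
-- ===== Notes on version B (the rewrite author's own statement) =====
-- stated objective: alternative
-- what changed: Replaces the per-target-student rescan of all enrollments with a single counting pass building a courses-per-student dict, then a filter of the target course's students.
import Mathlib
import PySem

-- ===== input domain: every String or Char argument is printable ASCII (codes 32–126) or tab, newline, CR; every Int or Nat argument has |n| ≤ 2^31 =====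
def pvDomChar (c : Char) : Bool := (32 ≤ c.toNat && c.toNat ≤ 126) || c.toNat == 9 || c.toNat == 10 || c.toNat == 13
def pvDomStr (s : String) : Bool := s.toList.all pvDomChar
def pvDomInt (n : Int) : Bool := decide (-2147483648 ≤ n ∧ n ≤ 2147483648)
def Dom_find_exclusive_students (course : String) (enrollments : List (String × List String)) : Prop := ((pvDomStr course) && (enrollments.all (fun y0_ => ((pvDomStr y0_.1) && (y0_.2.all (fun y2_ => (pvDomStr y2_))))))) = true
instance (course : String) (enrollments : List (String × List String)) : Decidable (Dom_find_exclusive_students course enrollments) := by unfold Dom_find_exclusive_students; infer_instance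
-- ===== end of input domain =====

-- B replaces A's per-student rescan of all enrollments with one counting pass
-- (courses-per-student dict) followed by a filter of the target course's students.

-- ===== PORT A =====
def find_exclusive_students (course : String) (enrollments : List (String × List String)) : List String :=
  let target := (PySem.Dict.mk enrollments).getD course []
  target.foldl (fun exclusive_students student =>
    let enrolled_courses := (enrollments.filter (fun p => p.2.contains student)).map (·.1)
    if enrolled_courses.length == 1 then PySem.Set.add exclusive_students student
    else exclusive_students) PySem.Set.empty

-- ===== PORT B =====
def find_exclusive_students_alt (course : String) (enrollments : List (String × List String)) : List String :=
  let counts : PySem.Dict String Int := enrollments.foldl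
    (fun d p => (PySem.Set.ofList p.2).foldl (fun d s => d.insert s (d.getD s 0 + 1)) d)
    PySem.Dict.empty
  let target := (PySem.Dict.mk enrollments).getD course []
  PySem.Set.ofList (target.filter (fun s => counts.getD s 0 == 1))

-- ===== PRECONDITION & SPEC =====
def Spec_find_exclusive_students (course : String) (enrollments : List (String × List String)) (out : List String) : Prop := out = find_exclusive_students_alt course enrollments
instance (course : String) (enrollments : List (String × List String)) (out : List String) : Decidable (Spec_find_exclusive_students course enrollments out) := by unfold Spec_find_exclusive_students; infer_instance

-- ===== CLAIM (what is proved, stated in full; the proofs are below) =====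
def Claim_equal_find_exclusive_students : Prop := ∀ (course : String) (enrollments : List (String × List String)), Dom_find_exclusive_students course enrollments → Spec_find_exclusive_students course enrollments (find_exclusive_students course enrollments)

-- ===== LEMMAS AND PROOFS =====

-- number of distinct-membership hits Set.ofList contributes: 1 if member, else 0
lemma count_ofList_indicator (l : List String) (s : String) :
    List.count s (PySem.Set.ofList l) = (if l.contains s then 1 else 0) := by
  by_cases h : s ∈ l
  · simp [h]
  · simp [h, List.count_eq_zero.mpr (fun hc => h ((PySem.Set.mem_ofList l s).mp hc))]

-- the counting pass computes, for each student, how many enrollment entries contain them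
lemma counts_getD (es : List (String × List String)) (d : PySem.Dict String Int) (s : String) :
    (es.foldl (fun d p => (PySem.Set.ofList p.2).foldl (fun d x => d.insert x (d.getD x 0 + 1)) d) d).getD s 0
      = d.getD s 0 + ((es.filter (fun p => p.2.contains s)).length : Int) := by
  induction es generalizing d with
  | nil => simp
  | cons a t ih =>
    have hstep : ((PySem.Set.ofList a.2).foldl (fun d x => d.insert x (d.getD x 0 + 1)) d).getD s 0
        = d.getD s 0 + (if a.2.contains s then 1 else 0) := by
      have := PySem.Dict.getD_foldl_modify_add_one (PySem.Set.ofList a.2) d s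
      simpa [PySem.Dict.modify, count_ofList_indicator] using this
    rw [List.foldl_cons, ih, hstep, List.filter_cons]
    by_cases hm : s ∈ a.2 <;> simp [hm]; ring

lemma foldl_addif_congr (target : List String) (p q : String → Bool) (h : ∀ s, p s = q s) :
    target.foldl (fun ex s => if p s then PySem.Set.add ex s else ex) PySem.Set.empty
      = target.foldl (fun ex s => if q s then PySem.Set.add ex s else ex) [] := by
  have hpq : p = q := funext h
  subst hpq
  rfl

-- ===== VERDICT (by name: the statement is the Claim_ definition above) =====
theorem find_exclusive_students_spec : Claim_equal_find_exclusive_students := by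
  intro course enrollments _
  unfold Spec_find_exclusive_students find_exclusive_students find_exclusive_students_alt
  dsimp only
  rw [PySem.Set.ofList_eq_foldl, List.foldl_filter]
  refine foldl_addif_congr _ _ _ (fun s => ?_)
  rw [counts_getD]
  simp only [List.length_map]
  simp [PySem.Dict.empty, PySem.Dict.getD, PySem.Dict.get?]
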